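-- pv_equiv track=rewrite | github.com/showdeyang/lily | ui/templates/chatbot1.py | inclusion
-- ===== SOURCE A (Python) =====
-- def inclusion(query, question):
--     c1 = 0
--     for char in query:
--         if char in question:
--             c1 += 1
--
--     c2 = 0
--     for char in question:
--         if char in query:
--             c2 += 1
--
--     score = c1*c2
--     return score
-- ===== SOURCE B (Python) =====
-- def inclusion(query, question):
--     qc = {}
--     for ch in query:
--         qc[ch] = qc.get(ch, 0) + 1
--     sc = {}
--     for ch in question:
--         sc[ch] = sc.get(ch, 0) + 1
--     c1 = 0
--     c2 = 0
--     for ch in qc: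
--         if ch in sc:
--             c1 += qc[ch]
--             c2 += sc[ch]
--     return c1 * c2
-- ===== Notes on version B (the rewrite author's own statement) =====
-- stated objective: idiomatic
-- what changed: B builds a character-count dict for each string and makes one pass over the distinct characters of query shared with question, summing precomputed counts, instead of A's per-character membership scan of the other string.
import Mathlib
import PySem

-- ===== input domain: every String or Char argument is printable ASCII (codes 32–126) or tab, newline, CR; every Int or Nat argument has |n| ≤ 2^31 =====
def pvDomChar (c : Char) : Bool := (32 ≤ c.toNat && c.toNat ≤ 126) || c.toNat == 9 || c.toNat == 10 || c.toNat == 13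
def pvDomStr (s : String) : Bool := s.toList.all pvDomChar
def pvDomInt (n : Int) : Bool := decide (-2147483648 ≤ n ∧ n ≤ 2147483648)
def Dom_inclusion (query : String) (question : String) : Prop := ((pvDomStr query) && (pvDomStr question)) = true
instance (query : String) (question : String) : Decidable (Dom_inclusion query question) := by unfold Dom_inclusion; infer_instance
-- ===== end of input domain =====

-- B replaces A's per-character membership scans by two character counters and one pass
-- over the distinct characters of `query` (objective: idiomatic / data-structure change).

-- ===== PORT A =====
def inclusion (query : String) (question : String) : Int :=
  let c1 := query.toList.foldl
    (fun c ch => if question.toList.contains ch then c + 1 else c) 0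
  let c2 := question.toList.foldl
    (fun c ch => if query.toList.contains ch then c + 1 else c) 0
  c1 * c2

-- ===== PORT B =====
def inclusion_alt (query : String) (question : String) : Int :=
  let qc : PySem.Dict Char Int :=
    query.toList.foldl (fun d ch => d.insert ch (d.getD ch 0 + 1)) PySem.Dict.empty
  let sc : PySem.Dict Char Int :=
    question.toList.foldl (fun d ch => d.insert ch (d.getD ch 0 + 1)) PySem.Dict.empty
  let p := qc.keys.foldl
    (fun (p : Int × Int) ch =>
      if sc.contains ch then (p.1 + qc.getD ch 0, p.2 + sc.getD ch 0) else p)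
    (0, 0)
  p.1 * p.2

-- ===== PRECONDITION & SPEC =====
def Spec_inclusion (query : String) (question : String) (out : Int) : Prop := out = inclusion_alt query question
instance (query : String) (question : String) (out : Int) : Decidable (Spec_inclusion query question out) := by unfold Spec_inclusion; infer_instance

-- ===== CLAIM (what is proved, stated in full; the proofs are below) =====
def Claim_equal_inclusion : Prop := ∀ (query : String) (question : String), Dom_inclusion query question → Spec_inclusion query question (inclusion query question)

-- ===== LEMMAS AND PROOFS =====

-- a conditional fold is a fold over the filtered list
theorem pv_foldl_if_filter {α β : Type} (l : List α) (p : α → Bool) (f : β → α → β) (a : β) :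
    l.foldl (fun x c => if p c then f x c else x) a = (l.filter p).foldl f a := by
  induction l generalizing a with
  | nil => rfl
  | cons c l ih =>
    by_cases h : p c = true <;> simp [h, ih]

-- a pair-state conditional fold splits into two folds
theorem pv_foldl_pair {α : Type} (l : List α) (p : α → Bool) (f g : α → Int) (a b : Int) :
    l.foldl (fun (x : Int × Int) c => if p c then (x.1 + f c, x.2 + g c) else x) (a, b)
      = (l.foldl (fun x c => if p c then x + f c else x) a,
         l.foldl (fun x c => if p c then x + g c else x) b) := by
  induction l generalizing a b with
  | nil => rfl
  | cons c l ih =>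
    by_cases h : p c = true <;> simp [h, ih]

-- counting a +1 fold
theorem pv_foldl_count (l : List Char) (p : Char → Bool) (a : Int) :
    l.foldl (fun x c => if p c then x + 1 else x) a = a + ((l.filter p).length : Int) := by
  rw [pv_foldl_if_filter]
  induction (l.filter p) generalizing a with
  | nil => simp
  | cons c t ih => simp [ih]; ring

-- splitting a filter over a (c == k || q c) predicate
theorem pv_filter_cons_split (l : List Char) (k : Char) (q : Char → Bool) :
    (l.filter (fun c => c == k || q c)).length
      = l.count k + ((l.filter (fun c => c != k)).filter q).length := by
  induction l with
  | nil => simp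
  | cons c l ih =>
    by_cases hc : c = k
    · subst hc
      simp only [List.filter_cons, List.count_cons]
      simp [ih]
      omega
    · by_cases hq : q c = true <;>
        · simp only [List.filter_cons, List.count_cons]
          simp [hc, hq, ih]
          try omega

-- fold congruence on members
theorem pv_foldl_congr {α : Type} (l : List α) (f g : Int → α → Int) (a : Int)
    (h : ∀ x c, c ∈ l → f x c = g x c) : l.foldl f a = l.foldl g a := by
  induction l generalizing a with
  | nil => rfl
  | cons c l ih =>
    simp only [List.foldl_cons]
    rw [h a c (List.mem_cons_self)]
    exact ih _ (fun x c' hc' => h x c' (List.mem_cons_of_mem _ hc'))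

-- main sum lemma: summing occurrence counts over a nodup key list counts the filtered list
theorem pv_sum_count (ks : List Char) (l : List Char) (a : Int) (hnd : ks.Nodup) :
    ks.foldl (fun x k => x + (l.count k : Int)) a
      = a + ((l.filter (fun c => ks.contains c)).length : Int) := by
  induction ks generalizing l a with
  | nil => simp
  | cons k ks ih =>
    have hk : k ∉ ks := (List.nodup_cons.mp hnd).1
    have hnd' : ks.Nodup := (List.nodup_cons.mp hnd).2
    simp only [List.foldl_cons]
    rw [pv_foldl_congr ks _ (fun x k' => x + ((l.filter (fun c => c != k)).count k' : Int)) _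
        (by
          intro x k' hk'
          have hne : k' ≠ k := fun he => hk (he ▸ hk')
          have hcnt : (l.filter (fun c => c != k)).count k' = l.count k' := by
            rw [List.count_filter (by simp [hne])]
          simp [hcnt])]
    rw [ih _ _ hnd']
    have hsplit := pv_filter_cons_split l k (fun c => ks.contains c)
    have hcontains : (l.filter (fun c => (k :: ks).contains c))
        = l.filter (fun c => c == k || ks.contains c) := by
      apply List.filter_congr
      intro c _
      by_cases h : c = k <;> simp [h]
    rw [hcontains, hsplit]
    push_cast
    ring

-- ===== VERDICT (by name: the statement is the Claim_ definition above) =====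
-- Bool-level membership of a filtered dedup list, on members of the base list
theorem pv_contains_filter_dedup (ql sl : List Char) (c : Char) (hc : c ∈ ql) :
    ((PySem.Set.ofList ql).filter (fun k => sl.contains k)).contains c = sl.contains c := by
  by_cases h : c ∈ sl <;>
    simp [List.mem_filter, PySem.Set.mem_ofList, hc, h]

theorem pv_contains_filter_dedup' (ql sl : List Char) (c : Char) (hc : c ∈ sl) :
    ((PySem.Set.ofList ql).filter (fun k => sl.contains k)).contains c = ql.contains c := by
  by_cases h : c ∈ ql <;>
    simp [List.mem_filter, PySem.Set.mem_ofList, hc, h]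

theorem inclusion_spec : Claim_equal_inclusion := by
  intro q s _
  unfold Spec_inclusion inclusion inclusion_alt
  simp only [PySem.Dict.foldl_insert_getD_add_one_eq_counter, PySem.Dict.keys_counter,
    PySem.Dict.contains_counter, PySem.Dict.getD_counter]
  rw [pv_foldl_pair]
  dsimp only
  rw [pv_foldl_count, pv_foldl_count]
  rw [pv_foldl_if_filter, pv_foldl_if_filter,
    pv_sum_count _ _ _ ((PySem.Set.nodup_ofList q.toList).filter _),
    pv_sum_count _ _ _ ((PySem.Set.nodup_ofList q.toList).filter _)]
  rw [List.filter_congr (fun c hc => pv_contains_filter_dedup q.toList s.toList c hc),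
    List.filter_congr (fun c hc => pv_contains_filter_dedup' q.toList s.toList c hc)]
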